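-- pv_equiv track=rewrite | github.com/BooMBoTTess/Trainings_repo | 40yand/razm4.py | Solution
-- ===== SOURCE A (Python) =====
-- def Solution(students):
--     prefix = [sum(students[:i]) for i in range(len(students))]
--     sufix = [sum(students[i+1:]) for i in range(len(students)-1)]
--     sufix.append(0)
--     nedovoln = []
--     nedovoln.append(sufix[0] - students[0] * (len(students)-1))
--     for i in range(1, len(students)):
--         nedovoln.append((students[i] * (i) - prefix[i]) + (sufix[i] - students[i] * (len(students)-1-i)))
--     return nedovoln
-- ===== SOURCE B (Python) =====
-- def Solution(students):
--     total = sum(students)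
--     n = len(students)
--     out = []
--     pre = 0
--     for i, x in enumerate(students):
--         suf = total - pre - x
--         out.append(x * i - pre + suf - x * (n - 1 - i))
--         pre += x
--     return out
-- ===== Notes on version B (the rewrite author's own statement) =====
-- stated objective: faster
-- what changed: Replaced the O(n^2) precomputation of all prefix/suffix slice sums by a single pass that maintains a running prefix sum and derives the suffix sum from the total, keeping the same per-element formula.
import Mathlib
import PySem

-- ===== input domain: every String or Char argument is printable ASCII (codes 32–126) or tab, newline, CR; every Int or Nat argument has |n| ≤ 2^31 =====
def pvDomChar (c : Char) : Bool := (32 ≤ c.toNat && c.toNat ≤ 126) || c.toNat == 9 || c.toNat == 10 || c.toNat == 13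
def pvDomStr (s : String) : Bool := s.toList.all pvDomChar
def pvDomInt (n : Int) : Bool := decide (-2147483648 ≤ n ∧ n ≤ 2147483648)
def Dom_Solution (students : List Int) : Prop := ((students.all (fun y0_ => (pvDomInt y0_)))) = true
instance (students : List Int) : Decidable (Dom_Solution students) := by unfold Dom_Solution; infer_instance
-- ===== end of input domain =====

-- B replaces A's quadratic per-index slice sums by a single pass with a running prefix sum (objective: faster, asymptotic).

-- ===== PORT A =====
def Solution (students : List Int) : List Int :=
  let n : Int := students.length
  let prefx := (PySem.List.pyRange 0 n 1).map
      (fun i => (PySem.List.slice students none (some i)).sum)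
  let sufix := (PySem.List.pyRange 0 (n - 1) 1).map
      (fun i => (PySem.List.slice students (some (i + 1)) none).sum) ++ [0]
  let first := PySem.List.pyGetD sufix 0 0 - PySem.List.pyGetD students 0 0 * (n - 1)
  (PySem.List.pyRange 1 n 1).foldl
    (fun acc i =>
      acc ++ [(PySem.List.pyGetD students i 0 * i - PySem.List.pyGetD prefx i 0)
              + (PySem.List.pyGetD sufix i 0 - PySem.List.pyGetD students i 0 * (n - 1 - i))])
    [first]

-- ===== PORT B =====
def Solution_alt (students : List Int) : List Int :=
  let total := students.sum
  let n : Int := students.length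
  ((PySem.List.enumerate students 0).foldl
    (fun (st : List Int × Int) p =>
      let suf := total - st.2 - p.2
      (st.1 ++ [p.2 * p.1 - st.2 + suf - p.2 * (n - 1 - p.1)], st.2 + p.2))
    ([], 0)).1

-- ===== PRECONDITION & SPEC =====
-- A indexes the first element unconditionally, so it raises IndexError on the empty list; Pre_ excludes exactly that.
def Pre_Solution (students : List Int) : Prop := students ≠ []
instance (students : List Int) : Decidable (Pre_Solution students) := by unfold Pre_Solution; infer_instance
def pvWitness_Solution : List Int := ([1, 2, 3])

def Spec_Solution (students : List Int) (out : List Int) : Prop := out = Solution_alt students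
instance (students : List Int) (out : List Int) : Decidable (Spec_Solution students out) := by unfold Spec_Solution; infer_instance

-- ===== CLAIM (what is proved, stated in full; the proofs are below) =====
def Claim_equal_Solution : Prop := ∀ (students : List Int), Dom_Solution students → Pre_Solution students → Spec_Solution students (Solution students)

-- ===== LEMMAS AND PROOFS =====

-- reference list: element k is s[k]*k - sum(s[:k]) + sum(s[k+1:]) - s[k]*(n-1-k)
def Eref (s : List Int) : List Int :=
  (List.range s.length).map (fun k =>
    s.getD k 0 * (k : Int) - (s.take k).sum + (s.drop (k + 1)).sum
      - s.getD k 0 * ((s.length : Int) - 1 - (k : Int)))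

theorem foldl_append_singleton {α β : Type} (l : List α) (f : α → β) (init : List β) :
    l.foldl (fun acc i => acc ++ [f i]) init = init ++ l.map f := by
  induction l generalizing init with
  | nil => simp
  | cons x xs ih => simp [List.foldl_cons, ih, List.append_assoc]

theorem b_foldl_spec (total n : Int) :
    ∀ (ys : List Int) (k : Int) (acc : List Int) (pre : Int),
    (PySem.List.enumerate ys k).foldl
      (fun (st : List Int × Int) p =>
        let suf := total - st.2 - p.2
        (st.1 ++ [p.2 * p.1 - st.2 + suf - p.2 * (n - 1 - p.1)], st.2 + p.2))
      (acc, pre)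
    = (acc ++ (List.range ys.length).map (fun j =>
        ys.getD j 0 * (k + (j : Int)) - (pre + (ys.take j).sum)
          + (total - pre - (ys.take (j + 1)).sum)
          - ys.getD j 0 * (n - 1 - (k + (j : Int)))),
       pre + ys.sum) := by
  intro ys
  induction ys with
  | nil => intro k acc pre; simp [PySem.List.enumerate_nil]
  | cons x xs ih =>
    intro k acc pre
    rw [PySem.List.enumerate_cons, List.foldl_cons]
    simp only []
    rw [ih (k + 1), Prod.mk.injEq]
    refine ⟨?_, by simp; ring⟩
    rw [List.append_assoc]
    congr 1
    rw [List.length_cons, List.range_succ_eq_map, List.map_cons, List.map_map]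
    rw [List.singleton_append, List.cons_eq_cons]
    refine ⟨by simp, ?_⟩
    apply List.map_congr_left
    intro j _
    simp only [Function.comp_apply, List.getD_cons_succ, List.take_succ_cons,
      List.sum_cons]
    push_cast
    ring

theorem b_eq_Eref (s : List Int) : Solution_alt s = Eref s := by
  unfold Solution_alt Eref
  simp only []
  rw [b_foldl_spec s.sum (s.length : Int) s 0 [] 0]
  simp only [List.nil_append]
  apply List.map_congr_left
  intro k hk
  rw [List.mem_range] at hk
  have hdrop : (s.drop (k + 1)).sum = s.sum - (s.take (k + 1)).sum := by
    have h1 : (s.take (k + 1)).sum + (s.drop (k + 1)).sum = s.sum := by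
      rw [← List.sum_append, List.take_append_drop]
    omega
  rw [hdrop]
  ring

theorem pyGetD_append_left (xs ys : List Int) (j : Nat) (d : Int) (h : j < xs.length) :
    PySem.List.pyGetD (xs ++ ys) (j : Int) d = PySem.List.pyGetD xs (j : Int) d := by
  rw [PySem.List.pyGetD_natCast, PySem.List.pyGetD_natCast]
  rw [List.getD_eq_getElem?_getD, List.getD_eq_getElem?_getD, List.getElem?_append_left h]

theorem a_eq_Eref (s : List Int) (hs : s ≠ []) : Solution s = Eref s := by
  obtain ⟨m, hm⟩ : ∃ m, s.length = m + 1 := by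
    cases s with
    | nil => exact absurd rfl hs
    | cons a t => exact ⟨t.length, by simp⟩
  -- suffix-list element lemma
  have hsuf : ∀ (j : Nat), j < s.length →
      PySem.List.pyGetD
        ((PySem.List.pyRange 0 ((s.length : Int) - 1) 1).map
          (fun i => (PySem.List.slice s (some (i + 1)) none).sum) ++ [0]) (j : Int) 0
      = (s.drop (j + 1)).sum := by
    intro j hj
    by_cases hjm : j < m
    · rw [pyGetD_append_left _ _ _ _ (by
        rw [List.length_map, PySem.List.length_pyRange_one]; omega)]
      rw [PySem.List.pyGetD_map_pyRange_of_nonneg _ _ _ _ (by positivity) (by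
        push_cast; omega)]
      have : ((j : Int) + 1) = ((j + 1 : Nat) : Int) := by push_cast; ring
      rw [this, PySem.List.slice_from_natCast]
    · have hjeq : j = m := by omega
      have hlen : ((PySem.List.pyRange 0 ((s.length : Int) - 1) 1).map
          (fun i => (PySem.List.slice s (some (i + 1)) none).sum)).length = m := by
        rw [List.length_map, PySem.List.length_pyRange_one]; omega
      rw [PySem.List.pyGetD_natCast, List.getD_eq_getElem?_getD,
        List.getElem?_append_right (by omega), hlen]
      simp [List.drop_eq_nil_of_le (show s.length ≤ j + 1 by omega)]
  -- prefix-list element lemma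
  have hpre : ∀ (j : Nat), j < s.length →
      PySem.List.pyGetD
        ((PySem.List.pyRange 0 (s.length : Int) 1).map
          (fun i => (PySem.List.slice s none (some i)).sum)) (j : Int) 0
      = (s.take j).sum := by
    intro j hj
    rw [PySem.List.pyGetD_map_pyRange_of_nonneg _ _ _ _ (by positivity) (by push_cast; omega)]
    rw [PySem.List.slice_to_natCast]
  unfold Solution Eref
  simp only []
  rw [foldl_append_singleton, PySem.List.pyRange_one 1 ((s.length : Int))]
  have hn1 : (((s.length : Int)) - 1).toNat = m := by omega
  rw [hn1, show List.range s.length = 0 :: (List.range m).map Nat.succ from by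
    rw [hm, List.range_succ_eq_map]]
  rw [List.map_cons, List.map_map, List.map_map, List.singleton_append, List.cons_eq_cons]
  constructor
  · -- head element
    have h0 := hsuf 0 (by omega)
    norm_num at h0
    rw [h0, PySem.List.pyGetD_zero]
    simp
  · -- tail elements
    apply List.map_congr_left
    intro j hjm
    rw [List.mem_range] at hjm
    simp only [Function.comp_apply, Nat.succ_eq_add_one]
    have hcast : (1 : Int) + (j : Int) = ((j + 1 : Nat) : Int) := by push_cast; ring
    rw [hcast, hsuf (j + 1) (by omega), hpre (j + 1) (by omega),
      PySem.List.pyGetD_natCast]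
    ring

-- ===== VERDICT (by name: the statement is the Claim_ definition above) =====
theorem Solution_spec : Claim_equal_Solution := by
  intro s _ hpre
  unfold Spec_Solution
  rw [a_eq_Eref s hpre, b_eq_Eref s]
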